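-- pv_equiv track=rewrite | github.com/Qward1/TrueHack | src/tools/lua_tools.py | _extract_balanced_json_block
-- ===== SOURCE A (Python) =====
-- def _extract_balanced_json_block(text: str, start_index: int) -> str:
--     if start_index < 0 or start_index >= len(text):
--         return ""
--
--     opening = text[start_index]
--     closing = "}" if opening == "{" else "]" if opening == "[" else ""
--     if not closing:
--         return ""
--
--     depth = 0
--     in_string = False
--     escaped = False
--     for index in range(start_index, len(text)):
--         char = text[index]
--         if in_string:
--             if escaped:
--                 escaped = False
--             elif char == "\\":
--                 escaped = True
--             elif char == '"':
--                 in_string = False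
--             continue
--
--         if char == '"':
--             in_string = True
--             continue
--         if char == opening:
--             depth += 1
--         elif char == closing:
--             depth -= 1
--             if depth == 0:
--                 return text[start_index : index + 1]
--     return ""
-- ===== SOURCE B (Python) =====
-- def _skip_string(text, i):
--     # i points just past an opening quote; return index just past the closing
--     # quote, or None if the string never terminates.
--     n = len(text)
--     while i < n:
--         if text[i] == "\\":
--             i += 2
--         elif text[i] == '"':
--             return i + 1
--         else:
--             i += 1
--     return None
--
--
-- def _match(text, i, opening, closing):
--     # text[i] is `opening`; return the index of its matching `closing`,
--     # or None if the block never balances.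
--     i += 1
--     n = len(text)
--     while i < n:
--         c = text[i]
--         if c == '"':
--             i = _skip_string(text, i + 1)
--             if i is None:
--                 return None
--         elif c == opening:
--             j = _match(text, i, opening, closing)
--             if j is None:
--                 return None
--             i = j + 1
--         elif c == closing:
--             return i
--         else:
--             i += 1
--     return None
--
--
-- def _extract_balanced_json_block(text: str, start_index: int) -> str:
--     if start_index < 0 or start_index >= len(text):
--         return ""
--     opening = text[start_index]
--     closing = {"{": "}", "[": "]"}.get(opening)
--     if closing is None:
--         return ""
--     end = _match(text, start_index, opening, closing)
--     return "" if end is None else text[start_index:end + 1]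
-- ===== Notes on version B (the rewrite author's own statement) =====
-- stated objective: alternative
-- what changed: Replaced A's single flat scan carrying depth/in_string/escaped flags with a recursive-descent matcher: no depth counter exists; each nested opening bracket is handled by a recursive call that returns the index of its matching closer, and quoted strings are skipped by a dedicated helper.
import Mathlib
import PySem

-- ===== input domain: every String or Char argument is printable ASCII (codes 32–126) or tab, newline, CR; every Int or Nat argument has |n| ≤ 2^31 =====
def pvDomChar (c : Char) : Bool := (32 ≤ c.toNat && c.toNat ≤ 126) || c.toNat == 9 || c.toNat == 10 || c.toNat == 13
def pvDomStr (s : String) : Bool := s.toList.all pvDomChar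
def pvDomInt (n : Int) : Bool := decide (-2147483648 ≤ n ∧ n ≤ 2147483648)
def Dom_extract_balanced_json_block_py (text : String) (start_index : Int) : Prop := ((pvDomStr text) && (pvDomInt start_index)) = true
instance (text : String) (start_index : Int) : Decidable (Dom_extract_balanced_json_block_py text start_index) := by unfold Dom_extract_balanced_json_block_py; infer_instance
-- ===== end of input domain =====

-- B replaces A's flag-carrying depth-counter scan with a recursive-descent
-- matcher (no depth counter; nesting handled by recursion; objective: alternative).

-- ===== PORT A =====
-- A's for-loop over text[start_index:], carrying (depth, in_string, escaped)
-- and the count of characters consumed; returns the slice length when depth hits 0.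
def aScan (op cl : Char) : List Char → Int → Bool → Bool → Nat → Option Nat
  | [], _, _, _, _ => none
  | c :: rest, depth, inStr, esc, count =>
    if inStr then
      if esc then aScan op cl rest depth true false (count + 1)
      else if c = '\\' then aScan op cl rest depth true true (count + 1)
      else if c = '"' then aScan op cl rest depth false false (count + 1)
      else aScan op cl rest depth true false (count + 1)
    else
      if c = '"' then aScan op cl rest depth true false (count + 1)
      else if c = op then aScan op cl rest (depth + 1) false false (count + 1)
      else if c = cl then
        if depth - 1 = 0 then some (count + 1)
        else aScan op cl rest (depth - 1) false false (count + 1)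
      else aScan op cl rest depth false false (count + 1)

def extract_balanced_json_block_py (text : String) (start_index : Int) : String :=
  let cs := text.toList
  if start_index < 0 ∨ (cs.length : Int) ≤ start_index then ""
  else
    let s := start_index.toNat
    let opening := cs.getD s ' '
    let closing := if opening = '{' then "}" else if opening = '[' then "]" else ""
    if closing = "" then ""
    else
      match aScan opening (if opening = '{' then '}' else ']') (cs.drop s) 0 false false 0 with
      | some n => String.ofList ((cs.drop s).take n)
      | none => ""

-- ===== PORT B =====
-- B's _skip_string: past an opening quote, skip the string body (a backslash
-- consumes two characters); returns the remaining suffix and the number of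
-- characters consumed, or none when it runs off the end of the text.
def skipStr : List Char → Option (List Char × Nat)
  | [] => none
  | c :: rest =>
    if c = '\\' then
      match rest with
      | [] => none
      | _ :: rest' => (skipStr rest').map (fun p => (p.1, p.2 + 2))
    else if c = '"' then some (rest, 1)
    else (skipStr rest).map (fun p => (p.1, p.2 + 1))

theorem skipStr_length_le : ∀ (cs : List Char) (r : List Char) (k : Nat),
    skipStr cs = some (r, k) → r.length ≤ cs.length
  | [] => by intro r k h; simp [skipStr] at h
  | c :: rest => by
    intro r k h
    by_cases h1 : c = '\\'
    · subst h1
      match rest with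
      | [] => simp [skipStr] at h
      | x :: rest' =>
        simp [skipStr] at h
        obtain ⟨b, hs, hb⟩ := h
        have := skipStr_length_le rest' r b hs
        simp; omega
    · by_cases h2 : c = '"'
      · subst h2
        simp [skipStr.eq_def] at h
        simp [h.1]
      · rw [skipStr.eq_def] at h
        simp [h1, h2] at h
        obtain ⟨b, hs, hb⟩ := h
        have := skipStr_length_le rest r b hs
        simp; omega
termination_by cs => cs.length

-- B's _match after the opening bracket: no depth counter; a nested opening
-- bracket is resolved by a recursive call, a quote by skipStr; returns the
-- number of characters consumed up to and including the matching closer.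
def matchRec (op cl : Char) : List Char → Option Nat
  | [] => none
  | c :: rest =>
    if c = '"' then
      match h : skipStr rest with
      | none => none
      | some (r, k) => (matchRec op cl r).map (fun j => 1 + k + j)
    else if c = op then
      match matchRec op cl rest with
      | none => none
      | some j => (matchRec op cl (rest.drop j)).map (fun j2 => 1 + j + j2)
    else if c = cl then some 1
    else (matchRec op cl rest).map (fun j => 1 + j)
termination_by cs => cs.length
decreasing_by
  all_goals first
    | (have := skipStr_length_le rest r k h; simp; omega)
    | simp

def extract_balanced_json_block_py_alt (text : String) (start_index : Int) : String :=
  let cs := text.toList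
  if start_index < 0 ∨ (cs.length : Int) ≤ start_index then ""
  else
    let s := start_index.toNat
    let opening := cs.getD s ' '
    let closing? := if opening = '{' then some '}' else if opening = '[' then some ']' else none
    match closing? with
    | none => ""
    | some cl =>
      match matchRec opening cl (cs.drop (s + 1)) with
      | some j => String.ofList ((cs.drop s).take (1 + j))
      | none => ""

-- ===== PRECONDITION & SPEC =====
def Spec_extract_balanced_json_block_py (text : String) (start_index : Int) (out : String) : Prop := out = extract_balanced_json_block_py_alt text start_index
instance (text : String) (start_index : Int) (out : String) : Decidable (Spec_extract_balanced_json_block_py text start_index out) := by unfold Spec_extract_balanced_json_block_py; infer_instance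

-- ===== CLAIM (what is proved, stated in full; the proofs are below) =====
def Claim_equal_extract_balanced_json_block_py : Prop := ∀ (text : String) (start_index : Int), Dom_extract_balanced_json_block_py text start_index → Spec_extract_balanced_json_block_py text start_index (extract_balanced_json_block_py text start_index)

-- ===== LEMMAS AND PROOFS =====
theorem skipStr_backslash (x : Char) (rest' : List Char) :
    skipStr ('\\' :: x :: rest') = (skipStr rest').map (fun p => (p.1, p.2 + 2)) := by
  simp [skipStr]

theorem skipStr_quote (rest : List Char) : skipStr ('"' :: rest) = some (rest, 1) := by
  rw [skipStr.eq_def]; simp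

theorem skipStr_other {c : Char} (rest : List Char) (h1 : c ≠ '\\') (h2 : c ≠ '"') :
    skipStr (c :: rest) = (skipStr rest).map (fun p => (p.1, p.2 + 1)) := by
  rw [skipStr.eq_def]; simp [h1, h2]

theorem skipStr_drop : ∀ (cs : List Char) (r : List Char) (k : Nat),
    skipStr cs = some (r, k) → r = cs.drop k
  | [] => by intro r k h; simp [skipStr] at h
  | c :: rest => by
    intro r k h
    by_cases h1 : c = '\\'
    · subst h1
      match rest with
      | [] => simp [skipStr] at h
      | x :: rest' =>
        simp [skipStr] at h
        obtain ⟨b, hs, hb⟩ := h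
        have := skipStr_drop rest' r b hs
        subst hb
        simpa using this
    · by_cases h2 : c = '"'
      · subst h2
        rw [skipStr_quote] at h
        simp at h
        simp [h.1, h.2.symm]
      · rw [skipStr_other rest h1 h2] at h
        simp at h
        obtain ⟨b, hs, hb⟩ := h
        have := skipStr_drop rest r b hs
        subst hb
        simpa using this
termination_by cs => cs.length

-- A in-string mode equals skipStr then back to bracket mode.
theorem aScan_string (op cl : Char) : ∀ (cs : List Char) (depth : Int) (count : Nat),
    aScan op cl cs depth true false count =
      match skipStr cs with
      | none => none
      | some (r, k) => aScan op cl r depth false false (count + k) := by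
  intro cs
  match cs with
  | [] => intro depth count; simp [aScan, skipStr]
  | c :: rest =>
    intro depth count
    by_cases h1 : c = '\\'
    · subst h1
      match rest with
      | [] => simp [aScan, skipStr]
      | x :: rest' =>
        have ih := aScan_string op cl rest' depth (count + 2)
        rw [show aScan op cl ('\\' :: x :: rest') depth true false count
              = aScan op cl rest' depth true false (count + 2) by
            simp [aScan]]
        rw [ih, skipStr_backslash]
        cases hs : skipStr rest' with
        | none => simp
        | some p =>
          simp only [Option.map_some]
          rw [show count + 2 + p.2 = count + (p.2 + 2) by omega]
    · by_cases h2 : c = '"'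
      · subst h2
        rw [show aScan op cl ('"' :: rest) depth true false count
              = aScan op cl rest depth false false (count + 1) by simp [aScan]]
        rw [skipStr_quote]
      · have ih := aScan_string op cl rest depth (count + 1)
        rw [show aScan op cl (c :: rest) depth true false count
              = aScan op cl rest depth true false (count + 1) by simp [aScan, h1, h2]]
        rw [ih, skipStr_other rest h1 h2]
        cases hs : skipStr rest with
        | none => simp
        | some p =>
          simp only [Option.map_some]
          rw [show count + 1 + p.2 = count + (p.2 + 1) by omega]
termination_by cs => cs.length

-- A's depth-counter scan at depth d+1 equals one recursive-descent match,
-- then (if d > 0) the scan resumes at depth d.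
theorem aScan_matchRec (op cl : Char) (hop : op ≠ '"') (hcl : cl ≠ '"') (hoc : op ≠ cl) :
    ∀ (cs : List Char) (d : Nat) (count : Nat),
    aScan op cl cs ((d : Int) + 1) false false count =
      match matchRec op cl cs with
      | none => none
      | some j => if d = 0 then some (count + j)
                  else aScan op cl (cs.drop j) (d : Int) false false (count + j) := by
  intro cs
  match cs with
  | [] => intro d count; simp [aScan, matchRec]
  | c :: rest =>
    intro d count
    by_cases h1 : c = '"'
    · subst h1
      rw [show aScan op cl ('"' :: rest) ((d : Int) + 1) false false count
            = aScan op cl rest ((d : Int) + 1) true false (count + 1) by simp [aScan]]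
      rw [aScan_string]
      rw [matchRec.eq_def]
      simp only [reduceIte]
      cases hs : skipStr rest with
      | none => simp
      | some p =>
        obtain ⟨r, k⟩ := p
        have hdr := skipStr_drop rest r k hs
        have ih := aScan_matchRec op cl hop hcl hoc r d (count + 1 + k)
        dsimp only
        rw [ih]
        cases hm : matchRec op cl r with
        | none => rfl
        | some j =>
          simp only [Option.map_some]
          by_cases hd : d = 0
          · simp only [hd, reduceIte]
            congr 1
            omega
          · simp only [hd, reduceIte]
            have hdd : List.drop (1 + k + j) ('"' :: rest) = List.drop j r := by
              rw [hdr, List.drop_drop, show 1 + k + j = j + k + 1 by omega,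
                List.drop_succ_cons]
              congr 1
              omega
            rw [hdd]
            congr 1
            omega
    · by_cases h2 : c = op
      · rw [show aScan op cl (c :: rest) ((d : Int) + 1) false false count
              = aScan op cl rest ((d : Int) + 1 + 1) false false (count + 1) by
            rw [aScan.eq_def]; simp [h2, hop]]
        rw [show ((d : Int) + 1 + 1) = ((d + 1 : Nat) : Int) + 1 by push_cast; ring]
        rw [aScan_matchRec op cl hop hcl hoc rest (d + 1) (count + 1)]
        conv_rhs => rw [matchRec.eq_def]
        simp only [if_neg h1, if_pos h2]
        cases hm : matchRec op cl rest with
        | none => rfl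
        | some j =>
          dsimp only
          simp only [Nat.add_one_ne_zero, reduceIte]
          rw [show ((d + 1 : Nat) : Int) = (d : Int) + 1 by push_cast; ring]
          rw [aScan_matchRec op cl hop hcl hoc (rest.drop j) d (count + 1 + j)]
          cases hm2 : matchRec op cl (rest.drop j) with
          | none => rfl
          | some j2 =>
            simp only [Option.map_some]
            by_cases hd : d = 0
            · simp only [hd, reduceIte]
              congr 1
              omega
            · simp only [hd, reduceIte]
              have hdd : List.drop (1 + j + j2) (c :: rest) = List.drop j2 (List.drop j rest) := by
                rw [List.drop_drop, show 1 + j + j2 = j2 + j + 1 by omega,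
                  List.drop_succ_cons]
                congr 1
                omega
              rw [hdd]
              congr 1
              omega
      · by_cases h3 : c = cl
        · rw [matchRec.eq_def]
          simp only [if_neg h1, if_neg h2, if_pos h3]
          by_cases hd : d = 0
          · subst hd
            rw [show aScan op cl (c :: rest) (((0 : Nat) : Int) + 1) false false count
                  = some (count + 1) by
                rw [aScan.eq_def]; simp [h3, hcl, Ne.symm hoc]]
            simp
          · have hdi : ¬ ((d : Int) = 0) := by omega
            rw [show aScan op cl (c :: rest) ((d : Int) + 1) false false count
                  = aScan op cl rest (d : Int) false false (count + 1) by
                rw [aScan.eq_def]; simp [h3, hd, hcl, Ne.symm hoc]]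
            rw [if_neg hd]
            rfl
        · rw [show aScan op cl (c :: rest) ((d : Int) + 1) false false count
                = aScan op cl rest ((d : Int) + 1) false false (count + 1) by
              rw [aScan.eq_def]; simp [h1, h2, h3]]
          rw [aScan_matchRec op cl hop hcl hoc rest d (count + 1)]
          conv_rhs => rw [matchRec.eq_def]
          simp only [if_neg h1, if_neg h2, if_neg h3]
          cases hm : matchRec op cl rest with
          | none => rfl
          | some j =>
            simp only [Option.map_some]
            by_cases hd : d = 0
            · simp only [hd, reduceIte]
              congr 1
              omega
            · simp only [hd, reduceIte]
              have hdd : List.drop (1 + j) (c :: rest) = List.drop j rest := by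
                rw [show 1 + j = j + 1 by omega, List.drop_succ_cons]
              rw [hdd]
              congr 1
              omega
termination_by cs => cs.length
decreasing_by
  all_goals simp
  all_goals (have := skipStr_length_le rest r k hs; omega)

-- ===== VERDICT (by name: the statement is the Claim_ definition above) =====
-- Top of the scan: the first character is the opening bracket itself.
theorem aScan_top (op cl : Char) (hop : op ≠ '"') (hcl : cl ≠ '"') (hoc : op ≠ cl)
    (rest : List Char) :
    aScan op cl (op :: rest) 0 false false 0
      = (matchRec op cl rest).map (fun j => 1 + j) := by
  rw [show aScan op cl (op :: rest) 0 false false 0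
        = aScan op cl rest 1 false false 1 by
      rw [aScan.eq_def]; simp [hop]]
  rw [show (1 : Int) = ((0 : Nat) : Int) + 1 by norm_num]
  rw [aScan_matchRec op cl hop hcl hoc rest 0 1]
  cases hm : matchRec op cl rest with
  | none => rfl
  | some j => simp [Nat.add_comm]

-- ===== VERDICT (by name: the statement is the Claim_ definition above) =====
theorem extract_balanced_json_block_py_spec : Claim_equal_extract_balanced_json_block_py := by
  intro text start_index _
  unfold Spec_extract_balanced_json_block_py
  unfold extract_balanced_json_block_py extract_balanced_json_block_py_alt
  by_cases hb : start_index < 0 ∨ ((text.toList.length : Int) ≤ start_index)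
  · have hb' : start_index < 0 ∨ ((text.length : Int) ≤ start_index) := by simpa using hb
    simp [hb']
  · simp only [hb, if_false]
    rw [not_or, not_lt, not_le] at hb
    obtain ⟨h0, hlt⟩ := hb
    have hs : start_index.toNat < text.toList.length := by omega
    have hget : text.toList[start_index.toNat]? = some text.toList[start_index.toNat] :=
      List.getElem?_eq_getElem hs
    have hgetD : text.toList.getD start_index.toNat ' ' = text.toList[start_index.toNat] :=
      List.getD_eq_getElem _ _ hs
    have hdrop : text.toList.drop start_index.toNat
        = text.toList[start_index.toNat] :: text.toList.drop (start_index.toNat + 1) :=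
      List.drop_eq_getElem_cons hs
    by_cases hbr1 : text.toList[start_index.toNat] = '{'
    · simp only [hgetD, hbr1, hdrop, reduceIte]
      rw [aScan_top '{' '}' (by decide) (by decide) (by decide)]
      cases hm : matchRec '{' '}' (text.toList.drop (start_index.toNat + 1)) with
      | none => simp
      | some j => simp
    · by_cases hbr2 : text.toList[start_index.toNat] = '['
      · simp only [hgetD, hbr2, hdrop, reduceIte,
          (by decide : ¬(('[' : Char) = '{')), if_false]
        rw [aScan_top '[' ']' (by decide) (by decide) (by decide)]
        cases hm : matchRec '[' ']' (text.toList.drop (start_index.toNat + 1)) with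
        | none => simp
        | some j => simp
      · simp [hget, hbr1, hbr2]
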